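-- pv_equiv track=rewrite | github.com/Extrieve/HackerRank-Python | icpc_team.py | acmTeam
-- ===== SOURCE A (Python) =====
-- import itertools
--
-- def acmTeam(topic):
--     # Write your code here
--     nmT = 0
--     cnt = 0
--     for i in itertools.combinations(topic, 2):
--         s = bin(int(i[0], 2) | int(i[1], 2)).count('1')
--         if nmT < s:
--             nmT = s
--             cnt = 0
--         if s == nmT:
--             cnt += 1
--     return (nmT, cnt)
-- ===== SOURCE B (Python) =====
-- def acmTeam(topic):
--     # Recursive head-vs-rest decomposition over precomputed integer bitmasks,
--     # merging (max, count) summaries with a semilattice merge instead of a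
--     # flat pair loop with a running max and reset counter.
--     if len(topic) < 2:
--         return (0, 0)
--     vals = [int(t, 2) for t in topic]
--
--     def merge(p, q):
--         if p[0] > q[0]:
--             return p
--         if q[0] > p[0]:
--             return q
--         return (p[0], p[1] + q[1])
--
--     def go(vs):
--         if len(vs) < 2:
--             return (0, 0)
--         head, rest = vs[0], vs[1:]
--         row = (0, 0)
--         for w in rest:
--             row = merge(row, (bin(head | w).count('1'), 1))
--         return merge(row, go(rest))
--
--     return go(vals)
-- ===== Notes on version B (the rewrite author's own statement) =====
-- stated objective: alternative
-- what changed: A's flat loop over itertools.combinations with a running max and a reset-and-count accumulator is replaced by a recursive head-vs-rest decomposition over precomputed integer bitmasks whose per-head (max, count) summaries are combined with an associative semilattice merge.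
import Mathlib
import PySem

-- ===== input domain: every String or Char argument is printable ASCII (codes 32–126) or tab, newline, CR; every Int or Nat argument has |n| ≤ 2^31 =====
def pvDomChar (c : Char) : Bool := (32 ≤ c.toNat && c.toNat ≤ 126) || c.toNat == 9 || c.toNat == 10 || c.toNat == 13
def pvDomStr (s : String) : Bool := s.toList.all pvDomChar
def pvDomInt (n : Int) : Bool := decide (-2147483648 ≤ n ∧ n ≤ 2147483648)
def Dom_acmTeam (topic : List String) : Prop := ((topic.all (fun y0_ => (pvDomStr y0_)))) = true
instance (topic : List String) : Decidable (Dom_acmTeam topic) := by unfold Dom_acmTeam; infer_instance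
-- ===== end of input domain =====

-- B replaces A's flat combinations loop with running max/reset-counter by a recursive
-- head-vs-rest decomposition over precomputed integer bitmasks merging (max, count) summaries.

-- ===== PORT A =====
-- the scoring expression bin(int(a,2) | int(b,2)).count('1')
def acmScore (a b : String) : Int :=
  ((PySem.Str.count
      (PySem.Int.pyBin
        (PySem.Int.bor ((PySem.Int.ofStrBase? a 2).getD 0) ((PySem.Int.ofStrBase? b 2).getD 0)))
      "1" : Nat) : Int)

-- one loop iteration of A: update running max (resetting the counter), then count ties
def acmStep (st : Int × Int) (s : Int) : Int × Int :=
  let st1 := if st.1 < s then (s, (0 : Int)) else st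
  if s == st1.1 then (st1.1, st1.2 + 1) else st1

def acmTeam (topic : List String) : Int × Int :=
  (PySem.List.combinations topic 2).foldl
    (fun st i =>
      acmStep st (acmScore ((PySem.List.pyGet? i 0).getD "") ((PySem.List.pyGet? i 1).getD "")))
    (0, 0)

-- ===== PORT B =====
-- B's merge of two (max, count) summaries
def pcMerge (p q : Int × Int) : Int × Int :=
  if p.1 > q.1 then p else if q.1 > p.1 then q else (p.1, p.2 + q.2)

-- B's scoring of two precomputed values: bin(head | w).count('1')
def acmScoreV (v w : Int) : Int :=
  ((PySem.Str.count (PySem.Int.pyBin (PySem.Int.bor v w)) "1" : Nat) : Int)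

-- B's recursion: head vs rest row summary, merged with the recursive result on rest
def acmGo : List Int → Int × Int
  | [] => (0, 0)
  | [_] => (0, 0)
  | head :: rest =>
      pcMerge (rest.foldl (fun row w => pcMerge row (acmScoreV head w, 1)) (0, 0)) (acmGo rest)

def acmTeam_alt (topic : List String) : Int × Int :=
  if topic.length < 2 then (0, 0)
  else acmGo (topic.map (fun t => (PySem.Int.ofStrBase? t 2).getD 0))

-- ===== PRECONDITION & SPEC =====
-- Pre_ excludes exactly the inputs on which Python A raises ValueError: at least two
-- topic strings (so the pair loop runs) of which some string int(s, 2) cannot parse.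
def Pre_acmTeam (topic : List String) : Prop :=
  topic.length ≤ 1 ∨ ∀ s ∈ topic, (PySem.Int.ofStrBase? s 2).isSome
instance (topic : List String) : Decidable (Pre_acmTeam topic) := by
  unfold Pre_acmTeam; infer_instance
def pvWitness_acmTeam : List String := ["10", "11", "1"]

def Spec_acmTeam (topic : List String) (out : Int × Int) : Prop := out = acmTeam_alt topic
instance (topic : List String) (out : Int × Int) : Decidable (Spec_acmTeam topic out) := by
  unfold Spec_acmTeam; infer_instance

-- ===== CLAIM =====
def Claim_equal_acmTeam : Prop := ∀ (topic : List String), Dom_acmTeam topic → Pre_acmTeam topic → Spec_acmTeam topic (acmTeam topic)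

-- ===== LEMMAS AND PROOFS =====

-- A's loop body coincides pointwise with B's merge of a singleton summary
theorem acmStep_eq_pcMerge (st : Int × Int) (s : Int) :
    acmStep st s = pcMerge st (s, 1) := by
  obtain ⟨m, c⟩ := st
  simp only [acmStep, pcMerge]
  by_cases h1 : m < s
  · have h2 : ¬ m > s := by omega
    have h3 : s > m := h1
    simp [h1, h2]
  · by_cases h4 : s = m
    · subst h4; simp
    · have h5 : m > s := by omega
      simp [h1, h5]
      omega

/-- Characterisation of A's loop: from any start state `(m, c)` it returns the running max
    `M = l.foldl max m` together with `c` (kept only if the max never moved) plus the number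
    of occurrences of `M` in `l`. -/
theorem acmStep_foldl_char (l : List Int) (m c : Int) :
    l.foldl acmStep (m, c) =
      (l.foldl max m, (if l.foldl max m = m then c else 0) + (l.count (l.foldl max m) : Int)) := by
  induction l generalizing m c with
  | nil => simp
  | cons s t ih =>
    simp only [List.foldl_cons]
    by_cases h : m < s
    · have hstep : acmStep (m, c) s = (s, 1) := by simp [acmStep, h]
      have hmax : max m s = s := by omega
      rw [hstep, ih s 1]
      simp only [hmax, Prod.mk.injEq]
      have hs : s ≤ t.foldl max s := (PySem.List.le_foldl_max t s).1
      refine ⟨by trivial, ?_⟩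
      by_cases hM : t.foldl max s = s
      · have hm : ¬ t.foldl max s = m := by omega
        simp only [hM, List.count_cons]
        simp
        omega
      · have hm : ¬ t.foldl max s = m := by omega
        simp only [hM, hm, List.count_cons]
        have : ¬ s = t.foldl max s := by omega
        simp [this]
    · have hmax : max m s = m := by omega
      simp only [hmax]
      by_cases hs : s = m
      · have hstep : acmStep (m, c) s = (m, c + 1) := by simp [acmStep, hs]
        rw [hstep, ih m (c + 1)]
        simp only [Prod.mk.injEq]
        refine ⟨by trivial, ?_⟩
        by_cases hM : t.foldl max m = m
        · simp [hM, hs]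
          omega
        · have hne : ¬ s = t.foldl max m := by
            intro h'; exact hM (by omega)
          simp [hM, hne]
      · have hstep : acmStep (m, c) s = (m, c) := by simp [acmStep, h, hs]
        rw [hstep, ih m c]
        have hm : m ≤ t.foldl max m := (PySem.List.le_foldl_max t m).1
        have hlt : s < m := by
          rcases lt_or_eq_of_le (not_lt.mp h) with h' | h'
          · exact h'
          · exact absurd h' hs
        have hne : ¬ s = t.foldl max m := by omega
        simp [hne]

-- A's fold from (0,0) over a nonnegative score list is (running max from 0, its count).
theorem acmStep_foldl_zero (l : List Int) :
    l.foldl acmStep (0, 0) = (l.foldl max 0, (l.count (l.foldl max 0) : Int)) := by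
  rw [acmStep_foldl_char]
  by_cases h : l.foldl max 0 = 0 <;> simp [h]

-- the maximum of a nonnegative list bounds all elements
theorem mem_le_foldl_max (l : List Int) (x : Int) (hx : x ∈ l) : x ≤ l.foldl max 0 :=
  (PySem.List.le_foldl_max l 0).2 x hx

-- foldl max commutes with a larger start value
theorem foldl_max_start (l : List Int) (a b : Int) :
    l.foldl max (max a b) = max a (l.foldl max b) := by
  induction l generalizing b with
  | nil => rfl
  | cons y t ih =>
    simp only [List.foldl_cons]
    rw [max_assoc, ih]

theorem foldl_max_nonneg (l : List Int) : 0 ≤ l.foldl max 0 :=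
  (PySem.List.le_foldl_max l 0).1

-- the maximum over an append splits as the max of the two maxima (nonneg start)
theorem foldl_max_append (l1 l2 : List Int) :
    (l1 ++ l2).foldl max 0 = max (l1.foldl max 0) (l2.foldl max 0) := by
  rw [List.foldl_append]
  have h : max (l1.foldl max 0) (0 : Int) = l1.foldl max 0 :=
    max_eq_left (foldl_max_nonneg l1)
  calc l2.foldl max (l1.foldl max 0)
      = l2.foldl max (max (l1.foldl max 0) 0) := by rw [h]
    _ = max (l1.foldl max 0) (l2.foldl max 0) := foldl_max_start l2 _ 0

-- merging the two summaries of l1 and l2 is the summary of l1 ++ l2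
theorem pcMerge_fold_append (l1 l2 : List Int) :
    pcMerge (l1.foldl acmStep (0, 0)) (l2.foldl acmStep (0, 0))
      = (l1 ++ l2).foldl acmStep (0, 0) := by
  rw [acmStep_foldl_zero, acmStep_foldl_zero, acmStep_foldl_zero,
      foldl_max_append, List.count_append]
  set M1 := l1.foldl max 0 with hM1
  set M2 := l2.foldl max 0 with hM2
  rcases lt_trichotomy M1 M2 with h | h | h
  · have hmax : max M1 M2 = M2 := max_eq_right (le_of_lt h)
    have hc : l1.count M2 = 0 := by
      rw [List.count_eq_zero]
      intro hmem
      exact absurd (mem_le_foldl_max l1 M2 hmem) (by omega)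
    have h1 : ¬ M1 > M2 := by omega
    simp [pcMerge, h1, h, hmax, hc]
  · have hmax : max M1 M2 = M1 := by omega
    have h1 : ¬ M1 > M2 := by omega
    have h2 : ¬ M2 > M1 := by omega
    simp [pcMerge, h]
  · have hmax : max M1 M2 = M1 := max_eq_left (le_of_lt h)
    have hc : l2.count M1 = 0 := by
      rw [List.count_eq_zero]
      intro hmem
      exact absurd (mem_le_foldl_max l2 M1 hmem) (by omega)
    simp [pcMerge, h, hmax, hc]

-- the score list A folds over, as a function of the input list
def scoresOf (topic : List String) : List Int :=
  (PySem.List.combinations topic 2).map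
    (fun i => acmScore ((PySem.List.pyGet? i 0).getD "") ((PySem.List.pyGet? i 1).getD ""))

theorem acmTeam_eq_fold (topic : List String) :
    acmTeam topic = (scoresOf topic).foldl acmStep (0, 0) := by
  unfold acmTeam scoresOf
  rw [List.foldl_map]

theorem scoresOf_cons (x : String) (xs : List String) :
    scoresOf (x :: xs) = xs.map (fun y => acmScore x y) ++ scoresOf xs := by
  unfold scoresOf
  rw [PySem.List.combinations_cons_succ, PySem.List.combinations_one, List.map_append,
      List.map_map, List.map_map]
  congr 1

-- B''s recursion computes exactly A''s fold over the score list
theorem acmGo_eq_fold (topic : List String) :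
    acmGo (topic.map (fun t => (PySem.Int.ofStrBase? t 2).getD 0))
      = (scoresOf topic).foldl acmStep (0, 0) := by
  induction topic with
  | nil => simp [acmGo, scoresOf, PySem.List.combinations]
  | cons x xs ih =>
    cases xs with
    | nil =>
      simp [acmGo, scoresOf, PySem.List.combinations]
    | cons y ys =>
      rw [scoresOf_cons]
      have hgo :
          acmGo ((x :: y :: ys).map (fun t => (PySem.Int.ofStrBase? t 2).getD 0))
            = pcMerge
                (((y :: ys).map (fun t => (PySem.Int.ofStrBase? t 2).getD 0)).foldl
                  (fun row w =>
                    pcMerge row (acmScoreV ((PySem.Int.ofStrBase? x 2).getD 0) w, 1)) (0, 0))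
                (acmGo ((y :: ys).map (fun t => (PySem.Int.ofStrBase? t 2).getD 0))) := by
        simp [acmGo]
      rw [hgo, ih]
      have hrow :
          (((y :: ys).map (fun t => (PySem.Int.ofStrBase? t 2).getD 0)).foldl
              (fun row w =>
                pcMerge row (acmScoreV ((PySem.Int.ofStrBase? x 2).getD 0) w, 1)) (0, 0))
            = ((y :: ys).map (fun t => acmScore x t)).foldl acmStep (0, 0) := by
        rw [List.foldl_map, List.foldl_map]
        apply PySem.List.foldl_congr_mem
        intro acc t _
        rw [acmStep_eq_pcMerge]
        rfl
      rw [hrow]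
      exact pcMerge_fold_append _ _

-- ===== VERDICT =====
theorem acmTeam_spec : Claim_equal_acmTeam := by
  intro topic _ _
  unfold Spec_acmTeam acmTeam_alt
  rw [acmTeam_eq_fold]
  by_cases h : topic.length < 2
  · simp only [h, if_true]
    match topic, h with
    | [], _ => rfl
    | [x], _ =>
      simp [scoresOf, PySem.List.combinations]
  · simp only [h, if_false]
    exact (acmGo_eq_fold topic).symm
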